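-- pv_equiv track=rewrite | github.com/i-am-phenomenal/exceptionally-obscure | seat_allocation.py | assign_corner_seats
-- ===== SOURCE A (Python) =====
-- def assign_corner_seats(seats, row_number):
--     row = seats[row_number]
--     for iter in range(0, len(row)):
--         if iter in [0, 1, 6, 7]:
--             row[iter] = "X"
--         else:
--             pass
--
--     seats[row_number] = row
--     return seats
-- ===== SOURCE B (Python) =====
-- def assign_corner_seats(seats, row_number):
--     row = seats[row_number]
--     n = len(row)
--     row[0:2] = ["X"] * min(2, n)
--     row[6:8] = ["X"] * min(2, max(n - 6, 0))
--     return seats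
-- ===== Notes on version B (the rewrite author's own statement) =====
-- stated objective: alternative
-- what changed: B replaces the per-index scan with membership test by two slice splices: it overwrites row[0:2] and row[6:8] with 'X' blocks of the right length, so the row-scan loop disappears entirely.
import Mathlib
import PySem

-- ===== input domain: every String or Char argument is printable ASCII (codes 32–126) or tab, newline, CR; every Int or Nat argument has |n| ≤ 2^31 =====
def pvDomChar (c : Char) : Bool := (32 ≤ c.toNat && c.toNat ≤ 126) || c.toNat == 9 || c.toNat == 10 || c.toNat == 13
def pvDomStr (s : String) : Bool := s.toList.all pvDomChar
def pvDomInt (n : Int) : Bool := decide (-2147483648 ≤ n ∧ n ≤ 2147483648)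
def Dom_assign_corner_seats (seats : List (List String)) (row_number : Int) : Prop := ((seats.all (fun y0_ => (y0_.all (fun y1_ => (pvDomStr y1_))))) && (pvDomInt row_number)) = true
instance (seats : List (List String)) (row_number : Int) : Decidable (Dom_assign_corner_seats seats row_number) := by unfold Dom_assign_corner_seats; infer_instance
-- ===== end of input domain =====

-- B replaces A's per-index scan (membership test against [0,1,6,7]) by two slice splices that
-- overwrite row[0:2] and row[6:8] with "X" blocks of the right length (objective: alternative).
-- Both A and B mutate the row in place in Python the same way; the equivalence proved here is
-- about the RETURN value.

-- ===== PORT A =====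
-- port of A: row = seats[row_number]; scan every index of the row, marking members of [0,1,6,7]; write back; return
def assign_corner_seats (seats : List (List String)) (row_number : Int) : List (List String) :=
  match PySem.List.pyGet? seats row_number with
  | none => seats  -- IndexError in Python; excluded by Pre_
  | some row =>
    let row := (PySem.List.pyRange 0 (row.length : Int) 1).foldl
      (fun r iter => if iter ∈ ([0, 1, 6, 7] : List Int) then PySem.List.pySetD r iter "X" else r)
      row
    PySem.List.pySetD seats row_number row

-- ===== PORT B =====
-- port of B: splice ["X"]*min(2,n) over row[0:2] and ["X"]*min(2,max(n-6,0)) over row[6:8];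
-- slice assignment with a replacement of the slice's own length is exactly
-- take/replicate/drop surgery on the list, which is how it is written here.
def assign_corner_seats_alt (seats : List (List String)) (row_number : Int) : List (List String) :=
  match PySem.List.pyGet? seats row_number with
  | none => seats  -- IndexError in Python; excluded by Pre_
  | some row =>
    let n := row.length
    let row := List.replicate (min 2 n) "X" ++ row.drop 2
    let row := row.take 6 ++ List.replicate (min 2 (n - 6)) "X" ++ row.drop 8
    PySem.List.pySetD seats row_number row

-- ===== PRECONDITION & SPEC =====
-- Pre_ excludes exactly the inputs where Python's seats[row_number] raises IndexError.
def Pre_assign_corner_seats (seats : List (List String)) (row_number : Int) : Prop :=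
  PySem.Raise.InRange seats.length row_number
instance (seats : List (List String)) (row_number : Int) : Decidable (Pre_assign_corner_seats seats row_number) := by unfold Pre_assign_corner_seats; infer_instance
def pvWitness_assign_corner_seats : List (List String) × Int := ([["a", "b", "c"]], 0)

def Spec_assign_corner_seats (seats : List (List String)) (row_number : Int) (out : List (List String)) : Prop := out = assign_corner_seats_alt seats row_number
instance (seats : List (List String)) (row_number : Int) (out : List (List String)) : Decidable (Spec_assign_corner_seats seats row_number out) := by unfold Spec_assign_corner_seats; infer_instance

-- ===== CLAIM (what is proved, stated in full; the proofs are below) =====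
def Claim_equal_assign_corner_seats : Prop := ∀ (seats : List (List String)) (row_number : Int), Dom_assign_corner_seats seats row_number → Pre_assign_corner_seats seats row_number → Spec_assign_corner_seats seats row_number (assign_corner_seats seats row_number)

-- ===== LEMMAS AND PROOFS =====

-- List.set past the end is a no-op
theorem set_oob {α : Type} (l : List α) (n : Nat) (a : α) (h : l.length ≤ n) : l.set n a = l := by
  apply List.ext_getElem (by simp)
  intro i h1 h2
  rw [List.getElem_set_ne]
  omega

-- canonical form both sides compute: mark whatever corners exist (List.set is a no-op out of range)
def markCorners (row : List String) : List String :=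
  (((row.set 0 "X").set 1 "X").set 6 "X").set 7 "X"

-- A's loop body is the identity on indices outside [0,1,6,7]
theorem foldl_skip (l : List Int) (r : List String)
    (h : ∀ i ∈ l, i ∉ ([0, 1, 6, 7] : List Int)) :
    l.foldl (fun r iter => if iter ∈ ([0, 1, 6, 7] : List Int) then PySem.List.pySetD r iter "X" else r) r = r := by
  induction l generalizing r with
  | nil => rfl
  | cons a t ih =>
    simp only [List.foldl]
    rw [if_neg (h a (by simp))]
    exact ih r (fun i hi => h i (by simp [hi]))

theorem b_splice_eq (row : List String) :
    ((List.replicate (min 2 row.length) "X" ++ row.drop 2).take 6 ++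
      List.replicate (min 2 (row.length - 6)) "X" ++
      (List.replicate (min 2 row.length) "X" ++ row.drop 2).drop 8)
    = markCorners row := by
  apply List.ext_getElem
  · simp [markCorners]; omega
  · intro i h1 h2
    simp only [markCorners]
    simp only [List.getElem_append, List.getElem_take, List.getElem_drop,
      List.getElem_replicate, List.length_take, List.length_append,
      List.length_replicate, List.length_drop, List.length_set,
      List.getElem_set] at h1 h2 ⊢
    split_ifs <;> first | rfl | omega | (congr 1; omega)

theorem a_loop_eq (row : List String) :
    (PySem.List.pyRange 0 (row.length : Int) 1).foldl
      (fun r iter => if iter ∈ ([0, 1, 6, 7] : List Int) then PySem.List.pySetD r iter "X" else r)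
      row
    = markCorners row := by
  rcases Nat.lt_or_ge row.length 8 with h | h
  · interval_cases hn : row.length
    · rw [show PySem.List.pyRange 0 ((0:Nat):Int) 1 = ([] : List Int) from by decide]
      simp_all [markCorners, set_oob, List.foldl]
    · rw [show PySem.List.pyRange 0 ((1:Nat):Int) 1 = ([0] : List Int) from by decide]
      simp only [List.foldl, markCorners]
      norm_num [PySem.List.pySetD_of_nonneg]
      simp_all [set_oob]
    · rw [show PySem.List.pyRange 0 ((2:Nat):Int) 1 = ([0, 1] : List Int) from by decide]
      simp only [List.foldl, markCorners]
      norm_num [PySem.List.pySetD_of_nonneg]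
      simp_all [set_oob]
    · rw [show PySem.List.pyRange 0 ((3:Nat):Int) 1 = ([0, 1, 2] : List Int) from by decide]
      simp only [List.foldl, markCorners]
      norm_num [PySem.List.pySetD_of_nonneg]
      simp_all [set_oob]
    · rw [show PySem.List.pyRange 0 ((4:Nat):Int) 1 = ([0, 1, 2, 3] : List Int) from by decide]
      simp only [List.foldl, markCorners]
      norm_num [PySem.List.pySetD_of_nonneg]
      simp_all [set_oob]
    · rw [show PySem.List.pyRange 0 ((5:Nat):Int) 1 = ([0, 1, 2, 3, 4] : List Int) from by decide]
      simp only [List.foldl, markCorners]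
      norm_num [PySem.List.pySetD_of_nonneg]
      simp_all [set_oob]
    · rw [show PySem.List.pyRange 0 ((6:Nat):Int) 1 = ([0, 1, 2, 3, 4, 5] : List Int) from by decide]
      simp only [List.foldl, markCorners]
      norm_num [PySem.List.pySetD_of_nonneg]
      simp_all [set_oob]
    · rw [show PySem.List.pyRange 0 ((7:Nat):Int) 1 = ([0, 1, 2, 3, 4, 5, 6] : List Int) from by decide]
      simp only [List.foldl, markCorners]
      norm_num [PySem.List.pySetD_of_nonneg]
      simp_all [set_oob]
  · rw [PySem.List.pyRange_one_append 0 8 (row.length : Int) (by norm_num) (by exact_mod_cast h),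
        List.foldl_append]
    rw [show PySem.List.pyRange 0 8 1 = [0, 1, 2, 3, 4, 5, 6, 7] from by decide]
    rw [foldl_skip _ _ (by intro i hi; rw [PySem.List.mem_pyRange_one] at hi; simp; omega)]
    simp [List.foldl, PySem.List.pySetD_of_nonneg, markCorners]

-- ===== VERDICT (by name: the statement is the Claim_ definition above) =====
theorem assign_corner_seats_spec : Claim_equal_assign_corner_seats := by
  intro seats rn _hdom hpre
  unfold Spec_assign_corner_seats assign_corner_seats assign_corner_seats_alt
  obtain ⟨row, hrow⟩ : ∃ r, PySem.List.pyGet? seats rn = some r := by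
    rcases h : PySem.List.pyGet? seats rn with _ | r
    · exact absurd ((PySem.List.pyGet?_eq_none_iff _ _).mp h) (not_not.mpr hpre)
    · exact ⟨r, rfl⟩
  simp only [hrow, a_loop_eq, b_splice_eq]
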